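-- pv_equiv track=rewrite | github.com/Racine-04/Advent-of-Code | 2024/Day5.py | isRightOrder
-- ===== SOURCE A (Python) =====
-- def isRightOrder(nums, order):
--     printed = []
--     for num in nums:
--         befores = order.get(num, [])
--         for before in befores:
--             if before in printed:
--                 return False
--         printed.append(num)
--     return True
-- ===== SOURCE B (Python) =====
-- def isRightOrder(nums, order):
--     first = {}
--     last = {}
--     for i, v in enumerate(nums):
--         if v not in first:
--             first[v] = i
--         last[v] = i
--     for num, befores in order.items():
--         if num not in last:
--             continue
--         ln = last[num]
--         for before in befores:
--             if before in first and first[before] < ln: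
--                 return False
--     return True
-- ===== Notes on version B (the rewrite author's own statement) =====
-- stated objective: faster
-- what changed: Replaces the sequence scan with a growing `printed` list (quadratic membership tests) by a single pass building first/last position indices over nums, then checks each precedence rule directly against those positions.
import Mathlib
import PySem

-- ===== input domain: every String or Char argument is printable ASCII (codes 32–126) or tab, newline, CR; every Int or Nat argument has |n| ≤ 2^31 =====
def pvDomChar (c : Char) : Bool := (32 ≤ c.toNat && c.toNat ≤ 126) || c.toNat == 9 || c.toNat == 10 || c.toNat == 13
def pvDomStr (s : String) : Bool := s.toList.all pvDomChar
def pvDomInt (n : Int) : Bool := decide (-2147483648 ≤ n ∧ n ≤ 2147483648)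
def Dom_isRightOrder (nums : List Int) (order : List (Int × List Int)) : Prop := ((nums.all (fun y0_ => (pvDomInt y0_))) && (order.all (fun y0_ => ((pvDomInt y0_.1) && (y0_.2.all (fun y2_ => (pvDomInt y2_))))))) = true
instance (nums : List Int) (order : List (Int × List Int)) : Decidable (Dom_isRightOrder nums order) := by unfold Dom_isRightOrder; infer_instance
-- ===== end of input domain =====

-- B replaces A's quadratic growing-`printed` membership scan by a one-pass first/last
-- position index over nums, then checks the rule dictionary directly (objective: faster).

-- ===== PORT A =====
-- A: for num in nums: for before in order.get(num, []): if before in printed: return False; printed.append(num)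
def isRightOrderLoopA (d : PySem.Dict Int (List Int)) (printed : List Int) : List Int → Bool
  | [] => true
  | num :: rest =>
    if (d.getD num []).any (fun before => printed.contains before) then false
    else isRightOrderLoopA d (printed ++ [num]) rest

def isRightOrder (nums : List Int) (order : List (Int × List Int)) : Bool :=
  isRightOrderLoopA (PySem.Dict.ofList order) [] nums

-- ===== PORT B =====
-- one pass: first[v] = earliest index of v, last[v] = latest index of v
def buildPosStep (p : PySem.Dict Int Int × PySem.Dict Int Int) (iv : Int × Int) :
    PySem.Dict Int Int × PySem.Dict Int Int :=
  ((if p.1.contains iv.2 then p.1 else p.1.insert iv.2 iv.1), p.2.insert iv.2 iv.1)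

-- for num, befores in order.items(): skip if num not in last; violation iff some before has first[before] < last[num]
def checkRulesB (first lastD : PySem.Dict Int Int) : List (Int × List Int) → Bool
  | [] => true
  | (num, befores) :: rest =>
    match lastD.get? num with
    | none => checkRulesB first lastD rest
    | some ln =>
      if befores.any (fun b => match first.get? b with
          | some fb => decide (fb < ln)
          | none => false)
      then false else checkRulesB first lastD rest

def isRightOrder_alt (nums : List Int) (order : List (Int × List Int)) : Bool :=
  let p := (PySem.List.enumerate nums).foldl buildPosStep (PySem.Dict.empty, PySem.Dict.empty)
  checkRulesB p.1 p.2 (PySem.Dict.ofList order).items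

-- ===== PRECONDITION & SPEC =====
def Spec_isRightOrder (nums : List Int) (order : List (Int × List Int)) (out : Bool) : Prop := out = isRightOrder_alt nums order
instance (nums : List Int) (order : List (Int × List Int)) (out : Bool) : Decidable (Spec_isRightOrder nums order out) := by unfold Spec_isRightOrder; infer_instance

-- ===== CLAIM (what is proved, stated in full; the proofs are below) =====
def Claim_equal_isRightOrder : Prop := ∀ (nums : List Int) (order : List (Int × List Int)), Dom_isRightOrder nums order → Spec_isRightOrder nums order (isRightOrder nums order)

-- ===== LEMMAS AND PROOFS =====

-- the violation predicate both programs decide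
def Viol (nums : List Int) (d : PySem.Dict Int (List Int)) : Prop :=
  ∃ i j : Nat, ∃ _ : i < j, ∃ hj : j < nums.length, ∃ hi : i < nums.length,
    nums[i] ∈ d.getD nums[j] []

-- the pair fold splits componentwise
theorem foldl_pair_split (l : List (Int × Int)) (a b : PySem.Dict Int Int) :
    l.foldl buildPosStep (a, b) =
      (l.foldl (fun d iv => if d.contains iv.2 then d else d.insert iv.2 iv.1) a,
       l.foldl (fun d iv => d.insert iv.2 iv.1) b) := by
  induction l generalizing a b with
  | nil => rfl
  | cons x t ih => simp [List.foldl, buildPosStep, ih]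

-- closed form for the first-occurrence fold
theorem firstFold_get? (l : List (Int × Int)) (d : PySem.Dict Int Int) (v : Int) :
    (l.foldl (fun d iv => if d.contains iv.2 then d else d.insert iv.2 iv.1) d).get? v =
      (d.get? v).or ((l.find? (fun iv => iv.2 == v)).map (·.1)) := by
  induction l generalizing d with
  | nil => simp
  | cons x t ih =>
    simp only [List.foldl_cons, List.find?_cons]
    by_cases hc : d.contains x.2 = true
    · rw [if_pos hc, ih]
      by_cases hv : x.2 = v
      · have : (d.get? v).isSome := by
          rw [← PySem.Dict.contains_eq_isSome_get?]; rw [← hv]; exact hc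
        cases h : d.get? v with
        | none => simp [h] at this
        | some w => simp [hv]
      · simp [show (x.2 == v) = false by simp [hv]]
    · rw [if_neg hc, ih, PySem.Dict.get?_insert]
      by_cases hv : v = x.2
      · rw [if_pos hv]
        have hd : d.get? v = none := by
          cases h : d.get? v with
          | none => rfl
          | some w =>
            exfalso; apply hc
            rw [PySem.Dict.contains_eq_isSome_get?, ← hv, h]; rfl
        simp [← hv, hd]
      · rw [if_neg hv]
        simp [show (x.2 == v) = false by simp [Ne.symm hv]]

-- closed form for the last-occurrence fold
theorem lastFold_get? (l : List (Int × Int)) (d : PySem.Dict Int Int) (v : Int) :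
    (l.foldl (fun d iv => d.insert iv.2 iv.1) d).get? v =
      ((l.reverse.find? (fun iv => iv.2 == v)).map (·.1)).or (d.get? v) := by
  induction l generalizing d with
  | nil => simp
  | cons x t ih =>
    simp only [List.foldl_cons, List.reverse_cons, List.find?_append, ih]
    cases h : t.reverse.find? (fun iv => iv.2 == v) with
    | some p => simp
    | none =>
      rw [PySem.Dict.get?_insert]
      by_cases hv : v = x.2
      · simp [hv]
      · rw [if_neg hv]
        simp [show (x.2 == v) = false by simp [Ne.symm hv]]

-- find? over enumerate: first occurrence
theorem find_enum_some (v : Int) (nums : List Int) : ∀ (s : Int) (p : Int × Int),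
    (PySem.List.enumerate nums s).find? (fun iv => iv.2 == v) = some p →
    ∃ k : Nat, k < nums.length ∧ p = (s + k, v) ∧ nums[k]? = some v ∧
      ∀ m : Nat, m < k → nums[m]? ≠ some v := by
  induction nums with
  | nil => intro s p h; simp [PySem.List.enumerate_nil] at h
  | cons x t ih =>
    intro s p h
    rw [PySem.List.enumerate_cons, List.find?_cons] at h
    by_cases hv : x = v
    · subst hv
      simp at h
      exact ⟨0, by simp, by simp [← h], by simp, by omega⟩
    · rw [show ((s, x).2 == v) = false by simp [hv]] at h
      obtain ⟨k, hk, hp, hg, hmin⟩ := ih (s + 1) p h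
      refine ⟨k + 1, by simpa using hk, by rw [hp]; congr 1; push_cast; ring, by simpa using hg, ?_⟩
      intro m hm
      cases m with
      | zero => simpa using hv
      | succ m' => simpa using hmin m' (by omega)

-- find? over reversed enumerate: last occurrence
theorem find_enum_rev_some (v : Int) (nums : List Int) : ∀ (s : Int) (p : Int × Int),
    (PySem.List.enumerate nums s).reverse.find? (fun iv => iv.2 == v) = some p →
    ∃ k : Nat, k < nums.length ∧ p = (s + k, v) ∧ nums[k]? = some v ∧
      ∀ m : Nat, k < m → nums[m]? ≠ some v := by
  induction nums with
  | nil => intro s p h; simp [PySem.List.enumerate_nil] at h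
  | cons x t ih =>
    intro s p h
    rw [PySem.List.enumerate_cons, List.reverse_cons, List.find?_append] at h
    cases hr : (PySem.List.enumerate t (s + 1)).reverse.find? (fun iv => iv.2 == v) with
    | some q =>
      rw [hr] at h; simp at h; subst h
      obtain ⟨k, hk, hp, hg, hmax⟩ := ih (s + 1) q hr
      refine ⟨k + 1, by simpa using hk, by rw [hp]; congr 1; push_cast; ring, by simpa using hg, ?_⟩
      intro m hm
      cases m with
      | zero => omega
      | succ m' => simpa using hmax m' (by omega)
    | none =>
      rw [hr] at h; simp at h
      obtain ⟨hxv, hp⟩ := h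
      have hnt : v ∉ t := by
        intro hmem
        have : ∃ q ∈ (PySem.List.enumerate t (s + 1)).reverse, (fun (iv : Int × Int) => iv.2 == v) q := by
          obtain ⟨k, hk, hkv⟩ := List.mem_iff_getElem.1 hmem
          exact ⟨((s + 1) + k, v), by
            rw [List.mem_reverse, PySem.List.mem_enumerate_iff _ _ _]
            exact ⟨k, hk, by rw [hkv]⟩, by simp⟩
        rw [← List.find?_isSome] at this
        rw [hr] at this; simp at this
      refine ⟨0, by simp, by simp [← hp, hxv], by simp [hxv], ?_⟩
      intro m hm
      cases m with
      | zero => omega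
      | succ m' =>
        simp only [List.getElem?_cons_succ]
        intro hc
        exact hnt (List.mem_of_getElem? hc)

-- membership gives a find? hit on enumerate (either orientation)
theorem find_enum_isSome (v : Int) (nums : List Int) (s : Int) (hv : v ∈ nums) :
    ((PySem.List.enumerate nums s).find? (fun iv => iv.2 == v)).isSome := by
  rw [List.find?_isSome]
  obtain ⟨k, hk, hkv⟩ := List.mem_iff_getElem.1 hv
  exact ⟨(s + k, v), (PySem.List.mem_enumerate_iff _ _ _).2 ⟨k, hk, by rw [hkv]⟩, by simp⟩

theorem find_enum_rev_isSome (v : Int) (nums : List Int) (s : Int) (hv : v ∈ nums) :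
    ((PySem.List.enumerate nums s).reverse.find? (fun iv => iv.2 == v)).isSome := by
  rw [List.find?_isSome]
  obtain ⟨k, hk, hkv⟩ := List.mem_iff_getElem.1 hv
  exact ⟨(s + k, v), by
    rw [List.mem_reverse, PySem.List.mem_enumerate_iff _ _ _]
    exact ⟨k, hk, by rw [hkv]⟩, by simp⟩

-- A-side characterisation
theorem loopA_false_iff (d : PySem.Dict Int (List Int)) (nums : List Int) :
    ∀ printed : List Int, (isRightOrderLoopA d printed nums = false ↔
      ∃ j : Nat, ∃ hj : j < nums.length, ∃ b, b ∈ d.getD nums[j] [] ∧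
        b ∈ printed ++ nums.take j) := by
  induction nums with
  | nil => intro printed; simp [isRightOrderLoopA]
  | cons num rest ih =>
    intro printed
    rw [isRightOrderLoopA]
    by_cases hany : (d.getD num []).any (fun before => printed.contains before) = true
    · simp only [hany, if_true]
      constructor
      · intro _
        obtain ⟨b, hb, hbp⟩ := List.any_eq_true.1 hany
        exact ⟨0, by simp, b, by simpa using hb, by simpa using List.mem_of_elem_eq_true hbp⟩
      · intro _; trivial
    · rw [if_neg hany, ih]
      constructor
      · rintro ⟨j, hj, b, hb, hbp⟩
        refine ⟨j + 1, by simpa using hj, b, by simpa using hb, ?_⟩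
        simp only [List.take_succ_cons]
        have := List.mem_append.1 hbp
        rcases this with h1 | h2
        · rcases List.mem_append.1 h1 with h3 | h4
          · simp [h3]
          · simp at h4; simp [h4]
        · simp [h2]
      · rintro ⟨j, hj, b, hb, hbp⟩
        cases j with
        | zero =>
          exfalso; apply hany
          simp only [List.take_zero, List.append_nil] at hbp
          simp only [List.getElem_cons_zero] at hb
          exact List.any_eq_true.2 ⟨b, hb, List.elem_eq_true_of_mem hbp⟩
        | succ j' =>
          refine ⟨j', by simpa using hj, b, by simpa using hb, ?_⟩
          simp only [List.take_succ_cons] at hbp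
          rcases List.mem_append.1 hbp with h1 | h2
          · exact List.mem_append.2 (.inl (List.mem_append.2 (.inl h1)))
          · rcases List.mem_cons.1 h2 with h3 | h4
            · exact List.mem_append.2 (.inl (by simp [h3]))
            · exact List.mem_append.2 (.inr h4)

-- B-side characterisation
theorem checkB_false_iff (first lastD : PySem.Dict Int Int) (items : List (Int × List Int)) :
    checkRulesB first lastD items = false ↔
      ∃ pr ∈ items, ∃ b ∈ pr.2, ∃ ln fb : Int,
        lastD.get? pr.1 = some ln ∧ first.get? b = some fb ∧ fb < ln := by
  induction items with
  | nil => simp [checkRulesB]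
  | cons pr rest ih =>
    obtain ⟨num, befores⟩ := pr
    cases hl : lastD.get? num with
    | none =>
      simp only [checkRulesB, hl]
      rw [ih]
      constructor
      · rintro ⟨pr, hpr, hrest⟩; exact ⟨pr, by simp [hpr], hrest⟩
      · rintro ⟨pr, hpr, b, hb, ln, fb, hln, hfb, hlt⟩
        rcases List.mem_cons.1 hpr with h1 | h2
        · exfalso; rw [h1] at hln; simp [hl] at hln
        · exact ⟨pr, h2, b, hb, ln, fb, hln, hfb, hlt⟩
    | some ln =>
      simp only [checkRulesB, hl]
      by_cases hany : befores.any (fun b => match first.get? b with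
          | some fb => decide (fb < ln)
          | none => false) = true
      · simp only [hany, if_true]
        constructor
        · intro _
          obtain ⟨b, hb, hbp⟩ := List.any_eq_true.1 hany
          cases hf : first.get? b with
          | none => rw [hf] at hbp; simp at hbp
          | some fb =>
            rw [hf] at hbp; simp at hbp
            exact ⟨(num, befores), by simp, b, hb, ln, fb, hl, hf, hbp⟩
        · intro _; trivial
      · rw [if_neg hany, ih]
        constructor
        · rintro ⟨pr, hpr, hrest⟩; exact ⟨pr, by simp [hpr], hrest⟩
        · rintro ⟨pr, hpr, b, hb, ln', fb, hln, hfb, hlt⟩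
          rcases List.mem_cons.1 hpr with h1 | h2
          · exfalso; apply hany
            rw [h1] at hln hb; simp only at hln hb
            rw [hl] at hln
            have : ln' = ln := (Option.some.inj hln).symm
            subst this
            exact List.any_eq_true.2 ⟨b, hb, by rw [hfb]; simpa using hlt⟩
          · exact ⟨pr, h2, b, hb, ln', fb, hln, hfb, hlt⟩

-- A decides Viol
theorem a_false_iff (nums : List Int) (order : List (Int × List Int)) :
    isRightOrder nums order = false ↔ Viol nums (PySem.Dict.ofList order) := by
  unfold isRightOrder
  rw [loopA_false_iff]
  constructor
  · rintro ⟨j, hj, b, hb, hbp⟩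
    simp only [List.nil_append] at hbp
    obtain ⟨i, hi, hib⟩ := List.mem_take_iff_getElem.1 hbp
    exact ⟨i, j, by omega, hj, by omega, by
      rw [show nums[i]'(by omega) = b from hib]; exact hb⟩
  · rintro ⟨i, j, hij, hj, hi, hmem⟩
    exact ⟨j, hj, nums[i], hmem, by
      simp only [List.nil_append]
      exact List.mem_take_iff_getElem.2 ⟨i, by omega, rfl⟩⟩

-- B decides Viol
theorem altB_false_iff (nums : List Int) (order : List (Int × List Int)) :
    isRightOrder_alt nums order = false ↔ Viol nums (PySem.Dict.ofList order) := by
  unfold isRightOrder_alt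
  simp only [foldl_pair_split]
  rw [checkB_false_iff]
  constructor
  · rintro ⟨pr, hpr, b, hb, ln, fb, hln, hfb, hlt⟩
    rw [lastFold_get?] at hln
    rw [firstFold_get?] at hfb
    simp only [PySem.Dict.get?_empty, Option.or_none, Option.none_or] at hln hfb
    cases hF : (PySem.List.enumerate nums 0).find? (fun iv => iv.2 == b) with
    | none => rw [hF] at hfb; simp at hfb
    | some p =>
      rw [hF] at hfb; simp at hfb
      cases hL : (PySem.List.enumerate nums 0).reverse.find? (fun iv => iv.2 == pr.1) with
      | none => rw [hL] at hln; simp at hln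
      | some q =>
        rw [hL] at hln; simp at hln
        obtain ⟨kf, hkf, hpf, hgf, _⟩ := find_enum_some b nums 0 p hF
        obtain ⟨kl, hkl, hql, hgl, _⟩ := find_enum_rev_some pr.1 nums 0 q hL
        have hfb' : fb = (kf : Int) := by rw [← hfb, hpf]; simp
        have hln' : ln = (kl : Int) := by rw [← hln, hql]; simp
        have hij : kf < kl := by
          rw [hfb', hln'] at hlt; exact_mod_cast hlt
        refine ⟨kf, kl, hij, hkl, hkf, ?_⟩
        have h1 : nums[kf]'hkf = b := by
          have := hgf; rw [List.getElem?_eq_getElem hkf] at this; injection this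
        have h2 : nums[kl]'hkl = pr.1 := by
          have := hgl; rw [List.getElem?_eq_getElem hkl] at this; injection this
        rw [h1, h2, PySem.Dict.getD_of_mem_items _ (by simpa using hpr) (PySem.Dict.nodup_keys_ofList order) []]
        exact hb
  · rintro ⟨i, j, hij, hj, hi, hmem⟩
    have hget : (PySem.Dict.ofList order).getD (nums[j]'hj) []
        = ((PySem.Dict.ofList order).get? (nums[j]'hj)).getD [] :=
      PySem.Dict.getD_eq_get?_getD ..
    cases hq : (PySem.Dict.ofList order).get? (nums[j]'hj) with
    | none => rw [hget, hq] at hmem; simp at hmem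
    | some bs =>
      rw [hget, hq] at hmem; simp only [Option.getD_some] at hmem
      have hitems : (nums[j]'hj, bs) ∈ (PySem.Dict.ofList order).items :=
        PySem.Dict.mem_items_of_get?_eq_some _ hq
      -- last index of nums[j]
      have hmemj : nums[j]'hj ∈ nums := List.getElem_mem hj
      have hLs := find_enum_rev_isSome (nums[j]'hj) nums 0 hmemj
      cases hL : (PySem.List.enumerate nums 0).reverse.find? (fun iv => iv.2 == nums[j]'hj) with
      | none => rw [hL] at hLs; simp at hLs
      | some q =>
      obtain ⟨kl, hkl, hql, hgl, hmax⟩ := find_enum_rev_some (nums[j]'hj) nums 0 q hL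
      -- first index of nums[i]
      have hmemi : nums[i]'hi ∈ nums := List.getElem_mem hi
      have hFs := find_enum_isSome (nums[i]'hi) nums 0 hmemi
      cases hF : (PySem.List.enumerate nums 0).find? (fun iv => iv.2 == nums[i]'hi) with
      | none => rw [hF] at hFs; simp at hFs
      | some p =>
      obtain ⟨kf, hkf, hpf, hgf, hmin⟩ := find_enum_some (nums[i]'hi) nums 0 p hF
      have hkfi : kf ≤ i := by
        by_contra hc
        exact hmin i (by omega) (List.getElem?_eq_getElem hi)
      have hjkl : j ≤ kl := by
        by_contra hc
        exact hmax j (by omega) (List.getElem?_eq_getElem hj)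
      refine ⟨(nums[j]'hj, bs), hitems, nums[i]'hi, hmem, (kl : Int), (kf : Int), ?_, ?_, ?_⟩
      · rw [lastFold_get?]
        simp only [PySem.Dict.get?_empty, Option.or_none]
        rw [hL, hql]; simp
      · rw [firstFold_get?]
        simp only [PySem.Dict.get?_empty, Option.none_or]
        rw [hF, hpf]; simp
      · exact_mod_cast by omega

-- ===== VERDICT (by name: the statement is the Claim_ definition above) =====
theorem isRightOrder_spec : Claim_equal_isRightOrder := by
  intro nums order _
  unfold Spec_isRightOrder
  cases hA : isRightOrder nums order with
  | false =>
    have := (a_false_iff nums order).1 hA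
    exact ((altB_false_iff nums order).2 this).symm
  | true =>
    cases hB : isRightOrder_alt nums order with
    | true => rfl
    | false =>
      have := (altB_false_iff nums order).1 hB
      rw [← a_false_iff nums order] at this
      rw [hA] at this; exact absurd this (by simp)
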